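-- pv_equiv track=rewrite | github.com/rafaelmgr12/python-alg | items-in-containers.py | numberOfItems
-- ===== SOURCE A (Python) =====
-- def numberOfItems(s, startIndices, endIndices):
--     # Write your code here
--     ln = len(s)
--     # pre-calc left-most pipe location and sum of stars arrays
--     stars = [0] * (ln+1)
--     lftpipeidx = [-1] * (ln+1)
--     for i, ch in enumerate(s,1):
--         if ch == "|":
--             stars[i] = stars[i-1]
--             lftpipeidx[i] = i
--         else:  # ch == *
--             stars[i] = stars[i-1] + 1
--             lftpipeidx[i] = lftpipeidx[i-1]
--     if lftpipeidx[-1] == -1: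
--         return [0]*len(startIndices)
--
--     # pre-calc right-most pipe location
--     rgtpipeidx = [ln+1] * (ln+1)
--     for i in range(ln-1,-1,-1):
--         if s[i] == '|':
--             rgtpipeidx[i+1] = i+1
--         else:
--             rgtpipeidx[i+1] = rgtpipeidx[i+2] if i < ln-1 else ln+1
--
--     # calc answer as difference between num. of stars b/w right and left pipes.
--     # right pipe is the left-most pipe from the end index, left pipe is the right-most one from the start index
--     ans = []
--     for i in range(len(startIndices)):
--         si, ei = startIndices[i], endIndices[i]
--         lftpipe = rgtpipeidx[si]
--         rgtpipe = lftpipeidx[ei]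
--         ans.append(stars[rgtpipe] - stars[lftpipe] if lftpipe < rgtpipe else 0)
--     return ans
-- ===== SOURCE B (Python) =====
-- def numberOfItems(s, startIndices, endIndices):
--     pipes = [i for i, ch in enumerate(s, 1) if ch == '|']
--     if not pipes:
--         return [0] * len(startIndices)
--     stars = [0]
--     for ch in s:
--         stars.append(stars[-1] + (1 if ch != '|' else 0))
--     ans = []
--     for si, ei in zip(startIndices, endIndices):
--         left = next((p for p in pipes if si <= p), None)
--         right = next((p for p in reversed(pipes) if p <= ei), None)
--         if left is not None and right is not None and left < right:
--             ans.append(stars[right] - stars[left])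
--         else:
--             ans.append(0)
--     return ans
-- ===== Notes on version B (the rewrite author's own statement) =====
-- stated objective: alternative
-- what changed: Replaces A's three preallocated index tables (nearest-pipe-left, nearest-pipe-right, star-prefix) filled by forward and backward assignment loops with a single list of pipe positions plus a star-prefix list built by appending; each query scans the pipe list from the front (leftmost pipe >= si) and from the back (rightmost pipe <= ei) instead of table lookups.
-- outside the precondition, e.g. on numberOfItems('|*|', [0], [3]): A returns [0], B returns [1]; on numberOfItems('|*|', [1], [-1]): A returns [1], B returns [0]
import Mathlib
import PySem

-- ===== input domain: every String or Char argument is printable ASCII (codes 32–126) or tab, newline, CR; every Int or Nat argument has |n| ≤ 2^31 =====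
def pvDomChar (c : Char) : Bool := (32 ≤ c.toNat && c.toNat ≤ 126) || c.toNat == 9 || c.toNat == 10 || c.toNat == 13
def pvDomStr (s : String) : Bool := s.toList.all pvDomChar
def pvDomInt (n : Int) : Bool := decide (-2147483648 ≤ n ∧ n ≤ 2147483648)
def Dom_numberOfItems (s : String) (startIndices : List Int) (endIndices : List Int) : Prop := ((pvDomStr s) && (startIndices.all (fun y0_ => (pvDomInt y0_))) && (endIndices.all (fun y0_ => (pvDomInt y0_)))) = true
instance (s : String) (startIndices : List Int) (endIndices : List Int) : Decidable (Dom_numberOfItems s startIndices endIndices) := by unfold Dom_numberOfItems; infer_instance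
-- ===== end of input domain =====

-- B replaces A's three preallocated index tables with a pipe-position list and a star
-- prefix list, answering each query by scanning the pipe list from each end (objective:
-- alternative; no asymptotic speed claim).

-- ===== PORT A =====
def numberOfItems (s : String) (startIndices : List Int) (endIndices : List Int) : List Int :=
  let cs := s.toList
  let ln := cs.length
  -- for i, ch in enumerate(s, 1): fill stars and lftpipeidx by assignment
  let p := (PySem.List.enumerate cs 1).foldl
    (fun (st : List Int × List Int) ic =>
      if ic.2 = '|' then
        (PySem.List.pySetD st.1 ic.1 (PySem.List.pyGetD st.1 (ic.1 - 1) 0),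
         PySem.List.pySetD st.2 ic.1 ic.1)
      else
        (PySem.List.pySetD st.1 ic.1 (PySem.List.pyGetD st.1 (ic.1 - 1) 0 + 1),
         PySem.List.pySetD st.2 ic.1 (PySem.List.pyGetD st.2 (ic.1 - 1) 0)))
    (List.replicate (ln + 1) 0, List.replicate (ln + 1) (-1))
  let stars := p.1
  let lft := p.2
  if PySem.List.pyGetD lft (-1) 0 = -1 then
    List.replicate startIndices.length (0 : Int)
  else
    -- for i in range(ln-1, -1, -1): fill rgtpipeidx
    let rgt := (PySem.List.pyRange ((ln : Int) - 1) (-1) (-1)).foldl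
      (fun (rgt : List Int) i =>
        if PySem.List.pyGetD cs i ' ' = '|' then
          PySem.List.pySetD rgt (i + 1) (i + 1)
        else
          PySem.List.pySetD rgt (i + 1)
            (if i < (ln : Int) - 1 then PySem.List.pyGetD rgt (i + 2) 0 else (ln : Int) + 1))
      (List.replicate (ln + 1) ((ln : Int) + 1))
    -- for i in range(len(startIndices)): ans.append(...)
    (PySem.List.pyRange 0 (startIndices.length) 1).foldl
      (fun ans i =>
        let si := PySem.List.pyGetD startIndices i 0
        let ei := PySem.List.pyGetD endIndices i 0
        let lftpipe := PySem.List.pyGetD rgt si 0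
        let rgtpipe := PySem.List.pyGetD lft ei 0
        ans ++ [if lftpipe < rgtpipe then
                  PySem.List.pyGetD stars rgtpipe 0 - PySem.List.pyGetD stars lftpipe 0
                else 0])
      []

-- ===== PORT B =====
def numberOfItems_alt (s : String) (startIndices : List Int) (endIndices : List Int) : List Int :=
  let cs := s.toList
  -- pipes = [i for i, ch in enumerate(s, 1) if ch == '|']
  let pipes : List Int := (PySem.List.enumerate cs 1).filterMap
    (fun ic => if ic.2 = '|' then some ic.1 else none)
  if pipes = [] then List.replicate startIndices.length 0
  else
    -- stars: prefix counts of items (non-pipe chars), built by appending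
    let stars : List Int := cs.foldl
      (fun acc ch => acc ++ [PySem.List.pyGetD acc (-1) 0 + (if ch ≠ '|' then 1 else 0)]) [0]
    (startIndices.zip endIndices).foldl
      (fun ans q =>
        let left := pipes.find? (fun p => q.1 ≤ p)
        let right := pipes.reverse.find? (fun p => p ≤ q.2)
        ans ++ [match left, right with
                | some l, some r =>
                    if l < r then PySem.List.pyGetD stars r 0 - PySem.List.pyGetD stars l 0 else 0
                | _, _ => 0])
      []

-- ===== PRECONDITION & SPEC =====
-- Pre_ only restricts inputs whose string contains a pipe (with no pipe, A answers every
-- query with 0 and so does B): there A raises IndexError unless endIndices is at least as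
-- long as startIndices and every used index is in range, and for query indices outside the
-- 1-based range [1, len(s)] (start 0 or negative, Python negative-index wraparound) A
-- returns accidental values of its never-assigned table slots, which B does not mimic;
-- end indices may additionally be 0 (both sides answer 0 there).
def Pre_numberOfItems (s : String) (startIndices : List Int) (endIndices : List Int) : Prop :=
  (s.toList.contains '|') = true →
    (startIndices.length ≤ endIndices.length ∧
     (startIndices.all (fun x => decide (1 ≤ x) && decide (x ≤ (s.toList.length : Int)))) = true ∧
     ((endIndices.take startIndices.length).all
        (fun x => decide (0 ≤ x) && decide (x ≤ (s.toList.length : Int)))) = true)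
instance (s : String) (startIndices : List Int) (endIndices : List Int) : Decidable (Pre_numberOfItems s startIndices endIndices) := by unfold Pre_numberOfItems; infer_instance

def pvWitness_numberOfItems : String × List Int × List Int := ("|**|*", [1, 2], [4, 5])

def Spec_numberOfItems (s : String) (startIndices : List Int) (endIndices : List Int) (out : List Int) : Prop := out = numberOfItems_alt s startIndices endIndices
instance (s : String) (startIndices : List Int) (endIndices : List Int) (out : List Int) : Decidable (Spec_numberOfItems s startIndices endIndices out) := by unfold Spec_numberOfItems; infer_instance

-- ===== CLAIM (what is proved, stated in full; the proofs are below) =====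
def Claim_equal_numberOfItems : Prop := ∀ (s : String) (startIndices : List Int) (endIndices : List Int), Dom_numberOfItems s startIndices endIndices → Pre_numberOfItems s startIndices endIndices → Spec_numberOfItems s startIndices endIndices (numberOfItems s startIndices endIndices)

-- ===== LEMMAS AND PROOFS =====
-- ===== helpers =====
def pvPipes : List Char → Nat → List Int
  | [], _ => []
  | c :: t, off => if c = '|' then ((off : Int) + 1) :: pvPipes t (off + 1) else pvPipes t (off + 1)

def pvIdxPipe : List Char → Option Nat
  | [] => none
  | c :: t => if c = '|' then some 0 else (pvIdxPipe t).map (· + 1)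

def pvFirstGE (cs : List Char) (k : Nat) : Int :=
  match pvIdxPipe (cs.drop (k - 1)) with
  | some j => ((k - 1 + j : Nat) : Int) + 1
  | none => (cs.length : Int) + 1

def pvLastLE (cs : List Char) : Nat → Int
  | 0 => -1
  | k + 1 => if cs.getD k ' ' = '|' then ((k : Int) + 1) else pvLastLE cs k

def pvCnt (p : Char → Bool) (cs : List Char) (i : Nat) : Int := ((cs.take i).countP p : Int)

-- ===== pipes facts =====
theorem pvPipes_enum (cs : List Char) (off : Nat) :
    (PySem.List.enumerate cs ((off : Int) + 1)).filterMap
      (fun ic => if ic.2 = '|' then some ic.1 else none) = pvPipes cs off := by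
  induction cs generalizing off with
  | nil => rfl
  | cons c t ih =>
    rw [PySem.List.enumerate_cons]
    by_cases h : c = '|' <;>
      simp [pvPipes, h, ← ih (off + 1), add_assoc, add_comm (1 : Int)]

theorem pvPipes_append (u v : List Char) (off : Nat) :
    pvPipes (u ++ v) off = pvPipes u off ++ pvPipes v (off + u.length) := by
  induction u generalizing off with
  | nil => simp [pvPipes]
  | cons c t ih =>
    by_cases h : c = '|' <;> simp [pvPipes, h, ih, add_assoc, add_comm 1 t.length]

theorem pvPipes_mem {t : List Char} {off : Nat} {p : Int} (h : p ∈ pvPipes t off) :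
    (off : Int) + 1 ≤ p ∧ p ≤ (off : Int) + t.length := by
  induction t generalizing off with
  | nil => simp [pvPipes] at h
  | cons c t ih =>
    simp only [pvPipes] at h
    have len : ((c :: t).length : Int) = (t.length : Int) + 1 := by simp
    rw [len]
    split at h
    · rcases List.mem_cons.1 h with h | h
      · subst h; omega
      · have := ih h; omega
    · have := ih h; omega

theorem pvPipes_head? (t : List Char) (off : Nat) :
    (pvPipes t off).head? = (pvIdxPipe t).map (fun j => ((off + j : Nat) : Int) + 1) := by
  induction t generalizing off with
  | nil => rfl
  | cons c t ih =>
    by_cases h : c = '|'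
    · simp [pvPipes, pvIdxPipe, h]
    · rw [show pvPipes (c :: t) off = pvPipes t (off + 1) by simp [pvPipes, h],
        ih (off + 1)]
      simp only [pvIdxPipe, if_neg h, Option.map_map]
      cases pvIdxPipe t with
      | none => rfl
      | some j =>
        simp only [Option.map_some, Function.comp_apply, Option.some.injEq]
        congr 1
        omega

theorem find?_head {l : List Int} {p : Int → Bool} (h : ∀ x ∈ l, p x = true) :
    l.find? p = l.head? := by
  cases l with
  | nil => rfl
  | cons a t => simp [List.find?, h a (by simp)]

theorem find?_none {l : List Int} {p : Int → Bool} (h : ∀ x ∈ l, p x = false) :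
    l.find? p = none := by
  exact List.find?_eq_none.2 (fun x hx => by simp [h x hx])

-- ===== query lemmas =====
theorem pvLastLE_le (cs : List Char) (k : Nat) : -1 ≤ pvLastLE cs k ∧ pvLastLE cs k ≤ (k : Int) := by
  induction k with
  | zero => simp [pvLastLE]
  | succ k ih =>
    simp only [pvLastLE]
    split
    · push_cast; omega
    · push_cast; omega

-- left query: find? over the pipes of cs with predicate (k ≤ ·)
theorem pv_left_query (cs : List Char) (k : Nat) (hk1 : 1 ≤ k) (hk2 : k ≤ cs.length) :
    (pvPipes cs 0).find? (fun p => decide ((k : Int) ≤ p)) =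
      (pvIdxPipe (cs.drop (k - 1))).map (fun j => ((k - 1 + j : Nat) : Int) + 1) := by
  have hsplit : cs = cs.take (k - 1) ++ cs.drop (k - 1) := (List.take_append_drop _ _).symm
  rw [show pvPipes cs 0 = pvPipes (cs.take (k-1)) 0 ++ pvPipes (cs.drop (k-1)) (0 + (cs.take (k-1)).length) by
        conv_lhs => rw [hsplit]
        exact pvPipes_append _ _ 0,
      List.find?_append]
  have hlen : (cs.take (k-1)).length = k - 1 := List.length_take_of_le (by omega)
  have h1 : (pvPipes (cs.take (k-1)) 0).find? (fun p => decide ((k : Int) ≤ p)) = none := by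
    apply find?_none
    intro x hx
    have := pvPipes_mem hx
    simp only [decide_eq_false_iff_not, not_le]
    have h2 : x ≤ ((cs.take (k-1)).length : Int) := by simpa using this.2
    have h3 : ((cs.take (k-1)).length : Int) ≤ (k : Int) - 1 := by
      have := hlen; omega
    omega
  rw [h1, Option.none_or]
  rw [find?_head]
  · rw [pvPipes_head?, hlen]
    cases pvIdxPipe (cs.drop (k-1)) <;> simp
  · intro x hx
    have := pvPipes_mem hx
    simp only [decide_eq_true_eq]
    have h2 : ((cs.take (k-1)).length : Int) + 1 ≤ x := by simpa using this.1
    rw [hlen] at h2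
    omega

-- right query: find? over reversed pipes with predicate (· ≤ k)
theorem pv_right_query (cs : List Char) (k : Nat) (hk : k ≤ cs.length) :
    (pvPipes cs 0).reverse.find? (fun p => decide (p ≤ (k : Int))) =
      (pvPipes (cs.take k) 0).getLast? := by
  have hsplit : cs = cs.take k ++ cs.drop k := (List.take_append_drop _ _).symm
  rw [show pvPipes cs 0 = pvPipes (cs.take k) 0 ++ pvPipes (cs.drop k) (0 + (cs.take k).length) by
        conv_lhs => rw [hsplit]
        exact pvPipes_append _ _ 0,
      List.reverse_append, List.find?_append]
  have hlen : (cs.take k).length = k := List.length_take_of_le hk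
  have h1 : ((pvPipes (cs.drop k) (0 + (cs.take k).length)).reverse.find? (fun p => decide (p ≤ (k : Int)))) = none := by
    apply find?_none
    intro x hx
    rw [List.mem_reverse] at hx
    have := (pvPipes_mem hx).1
    simp only [decide_eq_false_iff_not, not_le]
    omega
  rw [h1, Option.none_or, find?_head]
  · rw [List.head?_reverse]
  · intro x hx
    rw [List.mem_reverse] at hx
    have := (pvPipes_mem hx).2
    simp only [decide_eq_true_eq]
    rw [hlen] at this
    simpa using this

-- pvLastLE as the last pipe of the prefix
theorem pvLastLE_eq_getLast? (cs : List Char) (k : Nat) (hk : k ≤ cs.length) :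
    pvLastLE cs k = ((pvPipes (cs.take k) 0).getLast?).getD (-1) := by
  induction k with
  | zero => simp [pvLastLE, pvPipes]
  | succ k ih =>
    have hk' : k < cs.length := by omega
    have htake : cs.take (k+1) = cs.take k ++ [cs[k]] := by
      rw [List.take_add_one, List.getElem?_eq_getElem hk']
      rfl
    rw [htake, pvPipes_append]
    have hlen : (cs.take k).length = k := List.length_take_of_le (by omega)
    simp only [pvLastLE]
    rw [List.getD_eq_getElem?_getD, List.getElem?_eq_getElem hk']
    by_cases h : cs[k] = '|'
    · simp only [Option.getD_some, if_pos h]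
      rw [show pvPipes [cs[k]] (0 + (cs.take k).length) = [((k : Int) + 1)] by
            simp [pvPipes, h, hlen]]
      simp
    · simp only [Option.getD_some, if_neg h]
      rw [show pvPipes [cs[k]] (0 + (cs.take k).length) = [] by simp [pvPipes, h]]
      simp [ih (by omega)]

-- ===== array-shape helpers =====
theorem pv_getD_map_range {f : Nat → Int} {n m : Nat} (l2 : List Int) (d : Int) (h : m < n) :
    (List.map f (List.range n) ++ l2).getD m d = f m := by
  rw [List.getD_eq_getElem?_getD, List.getElem?_append_left (by simp [h])]
  simp [List.getElem?_range h]

theorem pv_pyGetD_map_range {f : Nat → Int} {n m : Nat} (l2 : List Int) (d : Int) (h : m < n) :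
    PySem.List.pyGetD (List.map f (List.range n) ++ l2) (m : Int) d = f m := by
  rw [PySem.List.pyGetD_natCast]
  exact pv_getD_map_range l2 d h

theorem pv_pyGetD_neg_one (f : Nat → Int) (m : Nat) (d : Int) :
    PySem.List.pyGetD (List.map f (List.range (m+1))) (-1) d = f m := by
  have hl : (List.map f (List.range (m+1))).length = m + 1 := by simp
  simp [PySem.List.pyGetD, PySem.List.pyGet?, PySem.List.pyIdx?, hl, List.getElem?_range]

theorem pv_set_map_range {f g : Nat → Int} {n r : Nat} {d v : Int}
    (hfg : ∀ i, i < n → g i = f i) (hv : g n = v) :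
    (List.map f (List.range n) ++ List.replicate (r+1) d).set n v
      = List.map g (List.range (n+1)) ++ List.replicate r d := by
  have h1 : (List.map f (List.range n)).length = n := by simp
  rw [List.set_append, if_neg (by omega), h1, Nat.sub_self]
  rw [show (List.replicate (r+1) d).set 0 v = v :: List.replicate r d by
        simp [List.replicate_succ]]
  rw [List.range_succ, List.map_append]
  have h2 : List.map g (List.range n) = List.map f (List.range n) :=
    List.map_congr_left (fun i hi => hfg i (List.mem_range.1 hi))
  rw [h2, ← hv]
  simp

theorem pv_set_map_range' {f g : Nat → Int} {n k : Nat} {v : Int} (hk : k < n)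
    (hfg : ∀ i, i < n → i ≠ k → g i = f i) (hv : g k = v) :
    (List.map f (List.range n)).set k v = List.map g (List.range n) := by
  apply List.ext_getElem
  · simp
  · intro i h1 h2
    simp only [List.getElem_set, List.getElem_map, List.getElem_range] at *
    simp only [List.length_set, List.length_map, List.length_range] at h1
    split
    · subst hv
      rename_i hki
      rw [hki]
    · exact (hfg i h1 (by omega)).symm

theorem pvCnt_succ (p : Char → Bool) (cs : List Char) (m : Nat) (hm : m < cs.length) :
    pvCnt p cs (m+1) = pvCnt p cs m + (if p cs[m] then 1 else 0) := by
  unfold pvCnt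
  rw [List.take_add_one, List.getElem?_eq_getElem hm]
  simp only [Option.toList_some, List.countP_append, List.countP_cons, List.countP_nil]
  split <;> simp_all

-- ===== B's stars list =====
theorem pvB_stars_aux (cs : List Char) (fuel : Nat) : ∀ (m : Nat), fuel = cs.length - m → m ≤ cs.length →
    (cs.drop m).foldl
      (fun acc ch => acc ++ [PySem.List.pyGetD acc (-1) 0 + (if ch ≠ '|' then 1 else 0)])
      (List.map (pvCnt (fun c => !(decide (c = '|'))) cs) (List.range (m+1)))
      = List.map (pvCnt (fun c => !(decide (c = '|'))) cs) (List.range (cs.length + 1)) := by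
  induction fuel with
  | zero =>
    intro m hf hm
    have : m = cs.length := by omega
    subst this
    simp
  | succ fuel ih =>
    intro m hf hm
    have hm' : m < cs.length := by omega
    rw [List.drop_eq_getElem_cons hm', List.foldl_cons]
    rw [pv_pyGetD_neg_one]
    rw [show List.map (pvCnt (fun c => !(decide (c = '|'))) cs) (List.range (m+1)) ++
          [pvCnt (fun c => !(decide (c = '|'))) cs m + (if cs[m] ≠ '|' then 1 else 0)]
        = List.map (pvCnt (fun c => !(decide (c = '|'))) cs) (List.range (m+2)) by
      rw [List.range_succ (n := m+1), List.map_append]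
      congr 1
      simp [pvCnt_succ _ _ _ hm']]
    exact ih (m+1) (by omega) (by omega)

theorem pvB_stars (cs : List Char) :
    cs.foldl (fun acc ch => acc ++ [PySem.List.pyGetD acc (-1) 0 + (if ch ≠ '|' then 1 else 0)]) [0]
      = List.map (pvCnt (fun c => !(decide (c = '|'))) cs) (List.range (cs.length + 1)) := by
  have h0 : ([0] : List Int) = List.map (pvCnt (fun c => !(decide (c = '|'))) cs) (List.range 1) := by
    simp [pvCnt]
  rw [h0]
  have := pvB_stars_aux cs cs.length 0 (by omega) (by omega)
  simpa using this


-- ===== A's first loop (stars & lftpipeidx tables) =====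
theorem pvA_loop1_aux (cs : List Char) (fuel : Nat) : ∀ m, fuel = cs.length - m → m ≤ cs.length →
    (PySem.List.enumerate (cs.drop m) ((m : Int) + 1)).foldl
      (fun (st : List Int × List Int) ic =>
        if ic.2 = '|' then
          (PySem.List.pySetD st.1 ic.1 (PySem.List.pyGetD st.1 (ic.1 - 1) 0),
           PySem.List.pySetD st.2 ic.1 ic.1)
        else
          (PySem.List.pySetD st.1 ic.1 (PySem.List.pyGetD st.1 (ic.1 - 1) 0 + 1),
           PySem.List.pySetD st.2 ic.1 (PySem.List.pyGetD st.2 (ic.1 - 1) 0)))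
      (List.map (pvCnt (fun c => !(decide (c = '|'))) cs) (List.range (m+1)) ++ List.replicate (cs.length - m) 0,
       List.map (pvLastLE cs) (List.range (m+1)) ++ List.replicate (cs.length - m) (-1))
      = (List.map (pvCnt (fun c => !(decide (c = '|'))) cs) (List.range (cs.length + 1)),
         List.map (pvLastLE cs) (List.range (cs.length + 1))) := by
  induction fuel with
  | zero =>
    intro m hf hm
    have : m = cs.length := by omega
    subst this
    simp
  | succ fuel ih =>
    intro m hf hm
    have hm' : m < cs.length := by omega
    rw [List.drop_eq_getElem_cons hm', PySem.List.enumerate_cons, List.foldl_cons]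
    simp only []
    have hgetD : cs.getD m ' ' = cs[m] := by
      rw [List.getD_eq_getElem?_getD, List.getElem?_eq_getElem hm']; rfl
    rw [show ((m : Int) + 1 - 1) = ((m : Nat) : Int) by ring,
        show ((m : Int) + 1) = (((m + 1 : Nat)) : Int) by push_cast; ring,
        show cs.length - m = (cs.length - (m+1)) + 1 by omega]
    rw [pv_pyGetD_map_range _ 0 (show m < m + 1 by omega)]
    by_cases h : cs[m] = '|'
    · rw [if_pos h]
      rw [PySem.List.pySetD_natCast, PySem.List.pySetD_natCast]
      rw [pv_set_map_range (g := pvCnt (fun c => !(decide (c = '|'))) cs)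
            (fun i _ => rfl)
            (by rw [pvCnt_succ _ _ _ hm']; simp [h]),
          pv_set_map_range (g := pvLastLE cs)
            (fun i _ => rfl)
            (by simp only [pvLastLE, hgetD, if_pos h]; push_cast; ring)]
      exact ih (m+1) (by omega) (by omega)
    · rw [if_neg h]
      rw [pv_pyGetD_map_range _ 0 (show m < m + 1 by omega)]
      rw [PySem.List.pySetD_natCast, PySem.List.pySetD_natCast]
      rw [pv_set_map_range (g := pvCnt (fun c => !(decide (c = '|'))) cs)
            (fun i _ => rfl)
            (by rw [pvCnt_succ _ _ _ hm']; simp [h]),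
          pv_set_map_range (g := pvLastLE cs)
            (fun i _ => rfl)
            (by simp only [pvLastLE, hgetD, if_neg h])]
      exact ih (m+1) (by omega) (by omega)

theorem pvA_loop1 (cs : List Char) :
    (PySem.List.enumerate cs 1).foldl
      (fun (st : List Int × List Int) ic =>
        if ic.2 = '|' then
          (PySem.List.pySetD st.1 ic.1 (PySem.List.pyGetD st.1 (ic.1 - 1) 0),
           PySem.List.pySetD st.2 ic.1 ic.1)
        else
          (PySem.List.pySetD st.1 ic.1 (PySem.List.pyGetD st.1 (ic.1 - 1) 0 + 1),
           PySem.List.pySetD st.2 ic.1 (PySem.List.pyGetD st.2 (ic.1 - 1) 0)))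
      (List.replicate (cs.length + 1) 0, List.replicate (cs.length + 1) (-1))
      = (List.map (pvCnt (fun c => !(decide (c = '|'))) cs) (List.range (cs.length + 1)),
         List.map (pvLastLE cs) (List.range (cs.length + 1))) := by
  have := pvA_loop1_aux cs cs.length 0 (by omega) (by omega)
  rw [show ((0 : Nat) : Int) + 1 = 1 by ring] at this
  simp only [List.drop_zero, Nat.sub_zero] at this
  have e1 : List.map (pvCnt (fun c => !(decide (c = '|'))) cs) (List.range (0+1)) ++ List.replicate cs.length (0 : Int)
      = List.replicate (cs.length + 1) (0 : Int) := by
    rw [show cs.length + 1 = 1 + cs.length by omega, List.replicate_add]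
    simp [pvCnt]
  have e2 : List.map (pvLastLE cs) (List.range (0+1)) ++ List.replicate cs.length (-1 : Int)
      = List.replicate (cs.length + 1) (-1 : Int) := by
    rw [show cs.length + 1 = 1 + cs.length by omega, List.replicate_add]
    simp [pvLastLE]
  rw [e1, e2] at this
  exact this


-- ===== A's second loop (rgtpipeidx table) =====
theorem pvFirstGE_succ (cs : List Char) (j : Nat) (hj : j < cs.length) :
    pvFirstGE cs (j+1) = if cs[j] = '|' then ((j : Int) + 1) else pvFirstGE cs (j+2) := by
  unfold pvFirstGE
  rw [show (j + 1 - 1) = j by omega, show (j + 2 - 1) = j + 1 by omega,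
      List.drop_eq_getElem_cons hj]
  by_cases h : cs[j] = '|'
  · simp [pvIdxPipe, h]
  · simp only [pvIdxPipe, if_neg h]
    cases ho : pvIdxPipe (cs.drop (j+1)) with
    | none => simp [ho]
    | some j' =>
      simp only [ho, Option.map_some, if_neg h]
      congr 1
      omega

theorem pvFirstGE_top (cs : List Char) : pvFirstGE cs (cs.length + 1) = (cs.length : Int) + 1 := by
  unfold pvFirstGE
  rw [show cs.length + 1 - 1 = cs.length by omega, List.drop_length]
  rfl

theorem pvA_loop2_aux (cs : List Char) : ∀ j, j ≤ cs.length →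
    (PySem.List.pyRange ((j : Int) - 1) (-1) (-1)).foldl
      (fun (rgt : List Int) i =>
        if PySem.List.pyGetD cs i ' ' = '|' then
          PySem.List.pySetD rgt (i + 1) (i + 1)
        else
          PySem.List.pySetD rgt (i + 1)
            (if i < (cs.length : Int) - 1 then PySem.List.pyGetD rgt (i + 2) 0 else (cs.length : Int) + 1))
      (List.map (fun k => if j + 1 ≤ k then pvFirstGE cs k else (cs.length : Int) + 1) (List.range (cs.length + 1)))
      = List.map (fun k => if 1 ≤ k then pvFirstGE cs k else (cs.length : Int) + 1) (List.range (cs.length + 1)) := by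
  intro j
  induction j with
  | zero =>
    intro _
    rw [show ((0 : Nat) : Int) - 1 = -1 by ring, PySem.List.pyRange_neg_one_eq_nil (by omega)]
    rfl
  | succ j ih =>
    intro hj
    rw [show (((j + 1 : Nat)) : Int) - 1 = (j : Int) by push_cast; ring,
        PySem.List.pyRange_neg_one_cons (by omega), List.foldl_cons]
    have hj' : j < cs.length := by omega
    have hgetD : PySem.List.pyGetD cs ((j : Int)) ' ' = cs[j] := by
      rw [PySem.List.pyGetD_natCast, List.getD_eq_getElem?_getD, List.getElem?_eq_getElem hj']
      rfl
    have hcast : ((j : Int) + 1) = (((j + 1 : Nat)) : Int) := by push_cast; ring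
    have hfg : ∀ i, i < cs.length + 1 → i ≠ j + 1 →
        (if j + 1 ≤ i then pvFirstGE cs i else (cs.length : Int) + 1)
          = (if j + 1 + 1 ≤ i then pvFirstGE cs i else (cs.length : Int) + 1) := by
      intro i h1 h2
      by_cases hle : j + 1 ≤ i
      · rw [if_pos hle, if_pos (by omega)]
      · rw [if_neg hle, if_neg (by omega)]
    rw [hgetD]
    by_cases h : cs[j] = '|'
    · rw [if_pos h, hcast, PySem.List.pySetD_natCast]
      rw [pv_set_map_range' (by omega) hfg
            (by rw [if_pos (by omega)]
                rw [pvFirstGE_succ cs j hj', if_pos h, hcast])]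
      exact ih (by omega)
    · rw [if_neg h]
      have hval : (if (j : Int) < (cs.length : Int) - 1 then
            PySem.List.pyGetD
              (List.map (fun k => if j + 1 + 1 ≤ k then pvFirstGE cs k else (cs.length : Int) + 1) (List.range (cs.length + 1)))
              ((j : Int) + 2) 0
          else (cs.length : Int) + 1) = pvFirstGE cs (j + 2) := by
        by_cases hlt : (j : Int) < (cs.length : Int) - 1
        · rw [if_pos hlt, show ((j : Int) + 2) = (((j + 2 : Nat)) : Int) by push_cast; ring,
              PySem.List.pyGetD_natCast]
          rw [List.getD_eq_getElem?_getD, List.getElem?_eq_getElem (by simp; omega)]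
          simp only [List.getElem_map, List.getElem_range, Option.getD_some]
          rw [if_pos (by omega)]
        · rw [if_neg hlt, show j + 2 = cs.length + 1 by omega, pvFirstGE_top]
      rw [hval, hcast, PySem.List.pySetD_natCast]
      rw [pv_set_map_range' (by omega) hfg
            (by rw [if_pos (by omega)]
                rw [pvFirstGE_succ cs j hj', if_neg h])]
      exact ih (by omega)

theorem pvA_loop2 (cs : List Char) :
    (PySem.List.pyRange ((cs.length : Int) - 1) (-1) (-1)).foldl
      (fun (rgt : List Int) i =>
        if PySem.List.pyGetD cs i ' ' = '|' then
          PySem.List.pySetD rgt (i + 1) (i + 1)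
        else
          PySem.List.pySetD rgt (i + 1)
            (if i < (cs.length : Int) - 1 then PySem.List.pyGetD rgt (i + 2) 0 else (cs.length : Int) + 1))
      (List.replicate (cs.length + 1) ((cs.length : Int) + 1))
      = List.map (fun k => if 1 ≤ k then pvFirstGE cs k else (cs.length : Int) + 1) (List.range (cs.length + 1)) := by
  have h0 : List.replicate (cs.length + 1) ((cs.length : Int) + 1)
      = List.map (fun k => if cs.length + 1 ≤ k then pvFirstGE cs k else (cs.length : Int) + 1) (List.range (cs.length + 1)) := by
    rw [List.map_congr_left (g := fun _ => (cs.length : Int) + 1)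
          (fun k hk => by rw [if_neg (by simp at hk; omega)])]
    simp
  rw [h0]
  exact pvA_loop2_aux cs cs.length (by omega)


-- ===== small bridges =====
theorem pv_getD_map {f : Nat → Int} {n m : Nat} (d : Int) (h : m < n) :
    (List.map f (List.range n)).getD m d = f m := by
  rw [List.getD_eq_getElem?_getD, List.getElem?_eq_getElem (by simp [h])]
  simp

theorem pvPipes_enum0 (cs : List Char) :
    (PySem.List.enumerate cs 1).filterMap
      (fun ic => if ic.2 = '|' then some ic.1 else none) = pvPipes cs 0 := by
  have := pvPipes_enum cs 0
  rwa [show ((0 : Nat) : Int) + 1 = 1 by ring] at this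

theorem pv_noPipes (cs : List Char) :
    pvLastLE cs cs.length = -1 ↔ pvPipes cs 0 = [] := by
  have h := pvLastLE_eq_getLast? cs cs.length (by omega)
  rw [List.take_length] at h
  rw [h]
  cases hl : (pvPipes cs 0).getLast? with
  | none => simp [List.getLast?_eq_none_iff.1 hl]
  | some r =>
    have hmem : r ∈ pvPipes cs 0 := List.mem_of_getLast? hl
    have := (pvPipes_mem hmem).1
    constructor
    · intro hr; simp at hr; omega
    · intro hr; rw [hr] at hl; simp at hl

theorem pvPipes_nil_iff (cs : List Char) (off : Nat) :
    pvPipes cs off = [] ↔ '|' ∉ cs := by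
  induction cs generalizing off with
  | nil => simp [pvPipes]
  | cons c t ih =>
    by_cases h : c = '|'
    · simp [pvPipes, h]
    · simp [pvPipes, h, ih (off + 1), Ne.symm h]

-- ===== per-query equality =====
theorem pv_query (cs : List Char)
    (si ei : Int) (hsi1 : 1 ≤ si) (hsi2 : si ≤ (cs.length : Int))
    (hei1 : 0 ≤ ei) (hei2 : ei ≤ (cs.length : Int)) :
    (if PySem.List.pyGetD (List.map (fun k => if 1 ≤ k then pvFirstGE cs k else (cs.length : Int) + 1) (List.range (cs.length + 1))) si 0 <
        PySem.List.pyGetD (List.map (pvLastLE cs) (List.range (cs.length + 1))) ei 0 then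
        PySem.List.pyGetD (List.map (pvCnt (fun c => !(decide (c = '|'))) cs) (List.range (cs.length + 1)))
          (PySem.List.pyGetD (List.map (pvLastLE cs) (List.range (cs.length + 1))) ei 0) 0 -
        PySem.List.pyGetD (List.map (pvCnt (fun c => !(decide (c = '|'))) cs) (List.range (cs.length + 1)))
          (PySem.List.pyGetD (List.map (fun k => if 1 ≤ k then pvFirstGE cs k else (cs.length : Int) + 1) (List.range (cs.length + 1))) si 0) 0
      else 0)
    = (match (pvPipes cs 0).find? (fun p => decide (si ≤ p)), (pvPipes cs 0).reverse.find? (fun p => decide (p ≤ ei)) with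
        | some l, some r => if l < r then
            PySem.List.pyGetD (List.map (pvCnt (fun c => !(decide (c = '|'))) cs) (List.range (cs.length + 1))) r 0 -
            PySem.List.pyGetD (List.map (pvCnt (fun c => !(decide (c = '|'))) cs) (List.range (cs.length + 1))) l 0
          else 0
        | _, _ => 0) := by
  have hsik : si = ((si.toNat : Nat) : Int) := by omega
  have heik : ei = ((ei.toNat : Nat) : Int) := by omega
  set k := si.toNat with hkdef
  set e := ei.toNat with hedef
  have hk1 : 1 ≤ k := by omega
  have hk2 : k ≤ cs.length := by omega
  have he2 : e ≤ cs.length := by omega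
  rw [hsik, heik]
  have hA_l : PySem.List.pyGetD (List.map (fun k => if 1 ≤ k then pvFirstGE cs k else (cs.length : Int) + 1) (List.range (cs.length + 1))) ((k : Nat) : Int) 0 = pvFirstGE cs k := by
    rw [PySem.List.pyGetD_natCast, pv_getD_map 0 (by omega), if_pos hk1]
  have hA_r : PySem.List.pyGetD (List.map (pvLastLE cs) (List.range (cs.length + 1))) ((e : Nat) : Int) 0 = pvLastLE cs e := by
    rw [PySem.List.pyGetD_natCast, pv_getD_map 0 (by omega)]
  rw [hA_l, hA_r, pv_left_query cs k hk1 hk2, pv_right_query cs e he2]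
  have hlast := pvLastLE_eq_getLast? cs e he2
  cases hIdx : pvIdxPipe (cs.drop (k - 1)) with
  | none =>
    have hge : pvFirstGE cs k = (cs.length : Int) + 1 := by unfold pvFirstGE; rw [hIdx]
    have hle := pvLastLE_le cs e
    rw [hge, if_neg (by omega)]
    simp only [Option.map_none]
  | some j =>
    have hge : pvFirstGE cs k = ((k - 1 + j : Nat) : Int) + 1 := by unfold pvFirstGE; rw [hIdx]
    simp only [Option.map_some]
    cases hLast : (pvPipes (cs.take e) 0).getLast? with
    | none =>
      have hr : pvLastLE cs e = -1 := by rw [hlast, hLast]; rfl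
      rw [hge, hr, if_neg (by omega)]
    | some r =>
      have hr : pvLastLE cs e = r := by rw [hlast, hLast]; rfl
      rw [hge, hr]


-- ===== main glue =====
theorem pv_main (s : String) (a b : List Int)
    (hpre : ('|' ∈ s.toList) →
      a.length ≤ b.length ∧
      (∀ x ∈ a, 1 ≤ x ∧ x ≤ (s.toList.length : Int)) ∧
      (∀ x ∈ b.take a.length, 0 ≤ x ∧ x ≤ (s.toList.length : Int))) :
    numberOfItems s a b = numberOfItems_alt s a b := by
  unfold numberOfItems numberOfItems_alt
  dsimp only
  rw [pvA_loop1 s.toList]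
  dsimp only
  rw [pvPipes_enum0 s.toList,
      pv_pyGetD_neg_one (pvLastLE s.toList) s.toList.length 0]
  by_cases hemp : pvPipes s.toList 0 = []
  · rw [if_pos ((pv_noPipes s.toList).2 hemp), if_pos hemp]
  · obtain ⟨hlen, hsb, heb⟩ := hpre (by
      by_contra hmem
      exact hemp ((pvPipes_nil_iff s.toList 0).2 hmem))
    rw [if_neg (fun hc => hemp ((pv_noPipes s.toList).1 hc)), if_neg hemp]
    rw [pvA_loop2 s.toList, pvB_stars s.toList]
    rw [PySem.List.foldl_append_singleton_eq_map, PySem.List.foldl_append_singleton_eq_map]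
    simp only [List.nil_append]
    apply List.ext_getElem
    · simp [PySem.List.length_pyRange_one, List.length_zip]
      omega
    · intro n h1 h2
      have hn1 : n < a.length := by
        simpa [PySem.List.length_pyRange_one] using h1
      have hn2 : n < b.length := by omega
      simp only [List.getElem_map]
      rw [PySem.List.getElem_pyRange_one, zero_add, List.getElem_zip]
      rw [PySem.List.pyGetD_natCast, PySem.List.pyGetD_natCast,
          List.getD_eq_getElem?_getD, List.getElem?_eq_getElem hn1,
          List.getD_eq_getElem?_getD, List.getElem?_eq_getElem hn2]
      dsimp only
      obtain ⟨hs1, hs2⟩ := hsb a[n] (List.getElem_mem hn1)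
      have hbtake : b[n] ∈ b.take a.length := by
        rw [show b[n] = (b.take a.length)[n]'(by simp; omega) from (List.getElem_take ..).symm]
        exact List.getElem_mem _
      obtain ⟨he1, he2⟩ := heb b[n] hbtake
      exact pv_query s.toList a[n] b[n] hs1 hs2 he1 he2

-- ===== VERDICT (by name: the statement is the Claim_ definition above) =====
theorem numberOfItems_spec : Claim_equal_numberOfItems := by
  intro s startIndices endIndices _ hpre
  unfold Spec_numberOfItems
  apply pv_main
  intro hmem
  obtain ⟨hlen, hsb, heb⟩ := hpre (by simpa using hmem)
  simp only [List.all_eq_true, Bool.and_eq_true, decide_eq_true_eq] at hsb heb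
  exact ⟨hlen, fun x hx => hsb x hx, fun x hx => heb x hx⟩
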